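-- pv_equiv track=rewrite | github.com/dsmdex/Code_path_sessions | unit_2/session_four/session_four_set_one.py | divide_list
-- ===== SOURCE A (Python) =====
-- def divide_list(nums: list):
--     if len(nums) % 2 == 0:
--         num_count = {}
--         for num in nums:
--             if num not in num_count:
--                 num_count[num] = 1
--             else:
--                 num_count[num] += 1
--
--         for key in num_count:
--             if num_count[key] % 2 != 0:
--                 return False
--         return True
--     return False
-- ===== SOURCE B (Python) =====
-- def divide_list(nums: list):
--     seen = set()
--     for num in nums:
--         if num in seen:
--             seen.discard(num)
--         else:
--             seen.add(num)
--     return not seen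
-- ===== Notes on version B (the rewrite author's own statement) =====
-- stated objective: simpler
-- what changed: Replaces the length-parity guard plus count-dictionary plus value scan with a single parity-toggle pass over one set of odd-count values, returning its emptiness (an odd total length always leaves the set nonempty).
import Mathlib
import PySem

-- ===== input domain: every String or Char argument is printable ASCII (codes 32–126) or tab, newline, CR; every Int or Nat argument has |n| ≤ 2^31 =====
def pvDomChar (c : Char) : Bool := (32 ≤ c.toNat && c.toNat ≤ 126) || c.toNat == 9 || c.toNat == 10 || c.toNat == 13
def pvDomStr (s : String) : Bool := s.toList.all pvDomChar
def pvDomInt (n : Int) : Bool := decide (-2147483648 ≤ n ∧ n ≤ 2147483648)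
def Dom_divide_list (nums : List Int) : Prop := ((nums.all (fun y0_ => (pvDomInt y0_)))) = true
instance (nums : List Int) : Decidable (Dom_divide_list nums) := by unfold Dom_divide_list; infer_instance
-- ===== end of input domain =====

-- B replaces A's length-parity guard + count dictionary + odd-value scan by a single
-- parity-toggle set pass whose emptiness is the answer (objective: simpler).

-- ===== PORT A =====
def divide_list (nums : List Int) : Bool :=
  if nums.length % 2 == 0 then
    let num_count : PySem.Dict Int Int :=
      nums.foldl (fun d num =>
        if !(PySem.Dict.contains d num) then PySem.Dict.insert d num 1
        else PySem.Dict.modify d num 0 (· + 1)) PySem.Dict.empty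
    -- 'for key in num_count: if odd: return False / return True' = every key passes
    -- (order-independent, so iterating the keys list is exact)
    (PySem.Dict.keys num_count).all
      (fun key => !(PySem.Int.mod (PySem.Dict.getD num_count key 0) 2 != 0))
  else false

-- ===== PORT B =====
def divide_list_alt (nums : List Int) : Bool :=
  (nums.foldl (fun s num =>
      if PySem.Set.contains s num then PySem.Set.discard s num
      else PySem.Set.add s num) (PySem.Set.empty : PySem.Set Int)).isEmpty

-- ===== PRECONDITION & SPEC =====
def Spec_divide_list (nums : List Int) (out : Bool) : Prop := out = divide_list_alt nums
instance (nums : List Int) (out : Bool) : Decidable (Spec_divide_list nums out) := by unfold Spec_divide_list; infer_instance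

-- ===== CLAIM (what is proved, stated in full; the proofs are below) =====
def Claim_equal_divide_list : Prop := ∀ (nums : List Int), Dom_divide_list nums → Spec_divide_list nums (divide_list nums)

-- ===== LEMMAS AND PROOFS =====

-- A's counting loop is Counter(nums): the absent-key branch 'd[num] = 1' coincides with modify
lemma fold_eq_counter (nums : List Int) :
    nums.foldl (fun d num =>
        if !(PySem.Dict.contains d num) then PySem.Dict.insert d num 1
        else PySem.Dict.modify d num 0 (· + 1)) PySem.Dict.empty
      = PySem.Dict.counter nums := by
  rw [PySem.Dict.counter_eq_foldl]
  have hf : (fun (d : PySem.Dict Int Int) num =>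
      if !(PySem.Dict.contains d num) then PySem.Dict.insert d num 1
      else PySem.Dict.modify d num 0 (· + 1))
      = (fun d x => d.modify x 0 (· + 1)) := by
    funext d x
    by_cases h : d.contains x
    · simp [h]
    · have hb : d.contains x = false := by simpa using h
      have hg : d.get? x = none := (PySem.Dict.get?_eq_none_iff_contains d x).mpr hb
      simp [hb, PySem.Dict.modify, PySem.Dict.getD, hg]
  rw [hf]

-- B's toggle loop: membership in the final set = parity of the count, xor-ed with the start set
lemma toggle_mem (nums : List Int) (s : PySem.Set Int) (x : Int) :
    (x ∈ nums.foldl (fun s num =>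
        if PySem.Set.contains s num then PySem.Set.discard s num
        else PySem.Set.add s num) s)
      ↔ ¬ (x ∈ s ↔ nums.count x % 2 = 1) := by
  induction nums generalizing s with
  | nil => simp
  | cons a t ih =>
    simp only [List.foldl_cons, ih, List.count_cons]
    by_cases hsa : a ∈ s
    · by_cases hax : x = a
      · subst hax
        simp [PySem.Set.mem_discard, hsa, Nat.add_mod]
        omega
      · simp [hsa, PySem.Set.mem_discard, hax, Ne.symm hax]
    · by_cases hax : x = a
      · subst hax
        simp [hsa, Nat.add_mod]
        omega
      · simp [hsa, hax, Ne.symm hax]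

-- all counts even forces an even length
lemma length_even_of_counts_even (nums : List Int)
    (h : ∀ x ∈ nums, nums.count x % 2 = 0) : nums.length % 2 = 0 := by
  have hsum := Multiset.toFinset_sum_count_eq (nums : Multiset Int)
  have heven : Even (∑ a ∈ (nums : Multiset Int).toFinset, (nums : Multiset Int).count a) := by
    apply Finset.even_sum
    intro a ha
    have ham : a ∈ nums := by simpa using ha
    simp only [Multiset.coe_count]
    exact Nat.even_iff.mpr (h a ham)
  rw [hsum] at heven
  have hcard : Multiset.card (nums : Multiset Int) = nums.length := by simp
  rw [hcard] at heven
  exact Nat.even_iff.mp heven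

lemma alt_true_iff (nums : List Int) :
    divide_list_alt nums = true ↔ ∀ x ∈ nums, nums.count x % 2 = 0 := by
  unfold divide_list_alt
  rw [List.isEmpty_iff, List.eq_nil_iff_forall_not_mem]
  constructor
  · intro h x _
    have hx := h x
    rw [toggle_mem] at hx
    simp only [PySem.Set.empty, List.not_mem_nil, false_iff] at hx
    omega
  · intro h x
    rw [toggle_mem]
    simp only [PySem.Set.empty, List.not_mem_nil, false_iff, not_not]
    by_cases hm : x ∈ nums
    · have := h x hm; omega
    · have : nums.count x = 0 := List.count_eq_zero.mpr hm
      omega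

lemma a_even_iff (nums : List Int) (h : nums.length % 2 = 0) :
    divide_list nums = true ↔ ∀ x ∈ nums, nums.count x % 2 = 0 := by
  unfold divide_list
  simp only [fold_eq_counter, h]
  simp [PySem.Dict.keys_counter, List.all_eq_true, PySem.Dict.getD_counter,
        PySem.Set.mem_ofList]
  constructor
  · intro hall x hx
    have := hall x hx
    omega
  · intro hall x hx
    have := hall x hx
    omega

-- ===== VERDICT (by name: the statement is the Claim_ definition above) =====
theorem divide_list_spec : Claim_equal_divide_list := by
  intro nums _
  unfold Spec_divide_list
  rw [Bool.eq_iff_iff]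
  by_cases h : nums.length % 2 = 0
  · rw [a_even_iff nums h, alt_true_iff]
  · have hA : divide_list nums = false := by
      unfold divide_list
      simp [h]
    have hB : divide_list_alt nums = false := by
      cases hb : divide_list_alt nums with
      | false => rfl
      | true => exact absurd (length_even_of_counts_even nums ((alt_true_iff nums).mp hb)) h
    rw [hA, hB]
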